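-- pv_equiv track=rewrite | github.com/sagidana/cai | src/cai/screen/overlays/history.py | _move_horizontal
-- ===== SOURCE A (Python) =====
-- def _move_horizontal(rows_to_cells: dict, coords: dict,
--                      current_nid: int, direction: int) -> int:
--     """h/l: step to the nearest node to the left/right at the same tree-row."""
--     cur_row, cur_col = coords[current_nid]
--     cells = sorted(rows_to_cells[cur_row])
--     if direction > 0:
--         for c, n in cells:
--             if c > cur_col:
--                 return n
--     else:
--         for c, n in reversed(cells):
--             if c < cur_col:
--                 return n
--     return current_nid
-- ===== SOURCE B (Python) =====
-- def _move_horizontal(rows_to_cells: dict, coords: dict,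
--                      current_nid: int, direction: int) -> int:
--     """h/l: nearest node left/right on the same row — one pass, no sort."""
--     cur_row, cur_col = coords[current_nid]
--     best = None
--     if direction > 0:
--         for cell in rows_to_cells[cur_row]:
--             if cell[0] > cur_col and (best is None or cell < best):
--                 best = cell
--     else:
--         for cell in rows_to_cells[cur_row]:
--             if cell[0] < cur_col and (best is None or cell > best):
--                 best = cell
--     return current_nid if best is None else best[1]
-- ===== Notes on version B (the rewrite author's own statement) =====
-- stated objective: faster
-- what changed: Replaces sorted(cells) + linear scan by a single unsorted pass keeping one best (c, n) candidate (lex min right of the cursor / lex max left of it).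
import Mathlib
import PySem

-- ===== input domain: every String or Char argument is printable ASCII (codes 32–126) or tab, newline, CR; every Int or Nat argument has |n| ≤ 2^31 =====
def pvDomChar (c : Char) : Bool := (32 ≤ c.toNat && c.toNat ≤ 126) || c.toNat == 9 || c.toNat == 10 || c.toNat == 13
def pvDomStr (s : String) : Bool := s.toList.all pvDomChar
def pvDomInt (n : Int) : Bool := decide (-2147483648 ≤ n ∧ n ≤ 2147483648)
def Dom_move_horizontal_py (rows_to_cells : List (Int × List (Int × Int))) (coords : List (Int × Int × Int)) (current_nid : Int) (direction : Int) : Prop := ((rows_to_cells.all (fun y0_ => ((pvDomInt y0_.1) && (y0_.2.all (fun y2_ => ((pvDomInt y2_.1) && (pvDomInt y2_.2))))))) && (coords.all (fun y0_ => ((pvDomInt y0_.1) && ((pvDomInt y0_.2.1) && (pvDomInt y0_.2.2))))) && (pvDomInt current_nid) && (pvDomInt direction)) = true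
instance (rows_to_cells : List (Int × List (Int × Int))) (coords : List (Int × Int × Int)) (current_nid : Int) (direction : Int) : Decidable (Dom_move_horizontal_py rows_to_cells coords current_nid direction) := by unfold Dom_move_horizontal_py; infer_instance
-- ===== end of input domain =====

-- B drops the sort: a single unsorted pass keeps the one best (c, n) candidate (lex min right of the cursor, lex max left of it) instead of sorting then scanning.


-- ===== PORT A =====
-- sorted(cells): Python sorts the (c, n) tuples lexicographically; key Prod.toLex is that order exactly.
def move_horizontal_py (rows_to_cells : List (Int × List (Int × Int))) (coords : List (Int × Int × Int)) (current_nid : Int) (direction : Int) : Int :=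
  match (PySem.Dict.mk coords).get? current_nid with
  | none => current_nid      -- Python: KeyError; excluded by Pre_
  | some rc =>
    match (PySem.Dict.mk rows_to_cells).get? rc.1 with
    | none => current_nid    -- Python: KeyError; excluded by Pre_
    | some cellsRaw =>
      let cells := PySem.List.sorted cellsRaw (fun p => (toLex p : Lex (Int × Int))) false
      if direction > 0 then
        -- for c, n in cells: if c > cur_col: return n
        match cells.find? (fun p => decide (rc.2 < p.1)) with
        | some p => p.2
        | none => current_nid
      else
        -- for c, n in reversed(cells): if c < cur_col: return n
        match cells.reverse.find? (fun p => decide (p.1 < rc.2)) with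
        | some p => p.2
        | none => current_nid

-- ===== PORT B =====
def move_horizontal_py_alt (rows_to_cells : List (Int × List (Int × Int))) (coords : List (Int × Int × Int)) (current_nid : Int) (direction : Int) : Int :=
  match (PySem.Dict.mk coords).get? current_nid with
  | none => current_nid      -- Python: KeyError; excluded by Pre_
  | some rc =>
    match (PySem.Dict.mk rows_to_cells).get? rc.1 with
    | none => current_nid    -- Python: KeyError; excluded by Pre_
    | some cellsRaw =>
      let best :=
        if direction > 0 then
          -- keep the lexicographically least cell strictly right of the cursor
          cellsRaw.foldl (fun best cell =>
            if decide (rc.2 < cell.1) &&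
               (match best with
                | none => true
                | some b => decide (cell.1 < b.1) || (decide (cell.1 = b.1) && decide (cell.2 < b.2)))
            then some cell else best) none
        else
          -- keep the lexicographically greatest cell strictly left of the cursor
          cellsRaw.foldl (fun best cell =>
            if decide (cell.1 < rc.2) &&
               (match best with
                | none => true
                | some b => decide (b.1 < cell.1) || (decide (b.1 = cell.1) && decide (b.2 < cell.2)))
            then some cell else best) none
      match best with
      | some p => p.2
      | none => current_nid

-- ===== PRECONDITION & SPEC =====
-- Pre_ excludes exactly the inputs where Python's A raises KeyError: current_nid missing from coords,
-- or its row missing from rows_to_cells (B raises the same KeyError there).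
def Pre_move_horizontal_py (rows_to_cells : List (Int × List (Int × Int))) (coords : List (Int × Int × Int)) (current_nid : Int) (direction : Int) : Prop :=
  ((((PySem.Dict.mk coords).get? current_nid).map
      (fun rc => ((PySem.Dict.mk rows_to_cells).get? rc.1).isSome)).getD false) = true
instance (rows_to_cells : List (Int × List (Int × Int))) (coords : List (Int × Int × Int)) (current_nid : Int) (direction : Int) : Decidable (Pre_move_horizontal_py rows_to_cells coords current_nid direction) := by unfold Pre_move_horizontal_py; infer_instance

def pvWitness_move_horizontal_py : (List (Int × List (Int × Int))) × (List (Int × Int × Int)) × Int × Int :=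
  ([(0, [(0, 1), (2, 2)])], [(1, (0, 0))], 1, 1)

def Spec_move_horizontal_py (rows_to_cells : List (Int × List (Int × Int))) (coords : List (Int × Int × Int)) (current_nid : Int) (direction : Int) (out : Int) : Prop := out = move_horizontal_py_alt rows_to_cells coords current_nid direction
instance (rows_to_cells : List (Int × List (Int × Int))) (coords : List (Int × Int × Int)) (current_nid : Int) (direction : Int) (out : Int) : Decidable (Spec_move_horizontal_py rows_to_cells coords current_nid direction out) := by unfold Spec_move_horizontal_py; infer_instance

-- ===== CLAIM (what is proved, stated in full; the proofs are below) =====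
def Claim_equal_move_horizontal_py : Prop := ∀ (rows_to_cells : List (Int × List (Int × Int))) (coords : List (Int × Int × Int)) (current_nid : Int) (direction : Int), Dom_move_horizontal_py rows_to_cells coords current_nid direction → Pre_move_horizontal_py rows_to_cells coords current_nid direction → Spec_move_horizontal_py rows_to_cells coords current_nid direction (move_horizontal_py rows_to_cells coords current_nid direction)

-- ===== LEMMAS AND PROOFS =====

-- "r is the candidate both loops are after": r is the ≤-least cell of xs satisfying q (none iff no cell does).
def IsBest (q : Int × Int → Bool) (le : Int × Int → Int × Int → Prop) (xs : List (Int × Int)) : Option (Int × Int) → Prop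
  | none => ∀ p ∈ xs, q p = false
  | some m => m ∈ xs ∧ q m = true ∧ ∀ p ∈ xs, q p = true → le m p

theorem isBest_unique {q : Int × Int → Bool} {le : Int × Int → Int × Int → Prop}
    (hanti : ∀ a b, le a b → le b a → a = b)
    {xs : List (Int × Int)} {r1 r2 : Option (Int × Int)}
    (h1 : IsBest q le xs r1) (h2 : IsBest q le xs r2) : r1 = r2 := by
  cases r1 with
  | none =>
    cases r2 with
    | none => rfl
    | some m => exact absurd h2.2.1 (by simp [h1 m h2.1])
  | some m =>
    cases r2 with
    | none => exact absurd h1.2.1 (by simp [h2 m h1.1])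
    | some m' =>
      have := hanti m m' (h1.2.2 m' h2.1 h2.2.1) (h2.2.2 m h1.1 h1.2.1)
      simp [this]

theorem isBest_perm {q : Int × Int → Bool} {le : Int × Int → Int × Int → Prop}
    {xs ys : List (Int × Int)} (hp : xs.Perm ys) {r : Option (Int × Int)}
    (h : IsBest q le xs r) : IsBest q le ys r := by
  cases r with
  | none => exact fun p hm => h p (hp.mem_iff.mpr hm)
  | some m => exact ⟨hp.mem_iff.mp h.1, h.2.1, fun p hm hq => h.2.2 p (hp.mem_iff.mpr hm) hq⟩

-- the first hit of a scan over a ≤-sorted list is the ≤-least hit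
theorem isBest_find?_of_pairwise {q : Int × Int → Bool} {le : Int × Int → Int × Int → Prop}
    (hrefl : ∀ a, le a a) :
    ∀ {ys : List (Int × Int)}, ys.Pairwise le → IsBest q le ys (ys.find? q) := by
  intro ys
  induction ys with
  | nil => intro _; exact fun p hm => absurd hm (List.not_mem_nil)
  | cons y t ih =>
    intro hpw
    rw [List.pairwise_cons] at hpw
    by_cases hq : q y = true
    · rw [List.find?_cons_of_pos hq]
      refine ⟨List.mem_cons_self, hq, ?_⟩
      intro p hm _
      rcases List.mem_cons.mp hm with h | h
      · exact h ▸ hrefl y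
      · exact hpw.1 p h
    · rw [List.find?_cons_of_neg (by simp [hq])]
      have hb := ih hpw.2
      cases hfind : t.find? q with
      | none =>
        rw [hfind] at hb
        intro p hm
        rcases List.mem_cons.mp hm with h | h
        · exact h ▸ (Bool.eq_false_iff.mpr hq)
        · exact hb p h
      | some m =>
        rw [hfind] at hb
        refine ⟨List.mem_cons_of_mem _ hb.1, hb.2.1, ?_⟩
        intro p hm hqp
        rcases List.mem_cons.mp hm with h | h
        · exact absurd (h ▸ hqp) hq
        · exact hb.2.2 p h hqp

-- the single-pass loop keeps the ≤-least hit
def condB (ltB : Int × Int → Int × Int → Bool) (best : Option (Int × Int)) (cell : Int × Int) : Bool :=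
  match best with | none => true | some b => ltB cell b

theorem isBest_foldl {q : Int × Int → Bool} {ltB : Int × Int → Int × Int → Bool}
    {le : Int × Int → Int × Int → Prop}
    (hrefl : ∀ a, le a a)
    (htrans : ∀ a b c, le a b → le b c → le a c)
    (hlt : ∀ a b, ltB a b = true → le a b)
    (hnlt : ∀ a b, ltB a b = false → le b a) :
    ∀ (xs seen : List (Int × Int)) (b0 : Option (Int × Int)),
      IsBest q le seen b0 →
      IsBest q le (seen ++ xs)
        (xs.foldl (fun best cell =>
          if q cell && condB ltB best cell then some cell else best) b0) := by
  intro xs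
  induction xs with
  | nil => intro seen b0 h; simpa using h
  | cons x t ih =>
    intro seen b0 h
    have step : IsBest q le (seen ++ [x])
        (if q x && condB ltB b0 x then some x else b0) := by
      by_cases hqx : q x = true
      · cases b0 with
        | none =>
          rw [if_pos (by simp [condB, hqx])]
          refine ⟨by simp, hqx, ?_⟩
          intro p hm hqp
          rcases List.mem_append.mp hm with hm | hm
          · exact absurd hqp (by simp [h p hm])
          · simp only [List.mem_singleton] at hm; exact hm ▸ hrefl x
        | some b =>
          by_cases hlb : ltB x b = true
          · rw [if_pos (by simp [condB, hqx, hlb])]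
            refine ⟨by simp, hqx, ?_⟩
            intro p hm hqp
            rcases List.mem_append.mp hm with hm | hm
            · exact htrans x b p (hlt x b hlb) (h.2.2 p hm hqp)
            · simp only [List.mem_singleton] at hm; exact hm ▸ hrefl x
          · rw [if_neg (by simp [condB, hlb])]
            refine ⟨List.mem_append_left _ h.1, h.2.1, ?_⟩
            intro p hm hqp
            rcases List.mem_append.mp hm with hm | hm
            · exact h.2.2 p hm hqp
            · simp only [List.mem_singleton] at hm
              exact hm ▸ hnlt x b (eq_false_of_ne_true hlb)
      · rw [if_neg (by simp [hqx])]
        cases b0 with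
        | none =>
          intro p hm
          rcases List.mem_append.mp hm with hm | hm
          · exact h p hm
          · simp only [List.mem_singleton] at hm
            exact hm ▸ eq_false_of_ne_true hqx
        | some m =>
          refine ⟨List.mem_append_left _ h.1, h.2.1, ?_⟩
          intro p hm hqp
          rcases List.mem_append.mp hm with hm | hm
          · exact h.2.2 p hm hqp
          · simp only [List.mem_singleton] at hm; rw [hm] at hqp; exact absurd hqp hqx
    have h2 := ih (seen ++ [x]) _ step
    simp only [List.append_assoc, List.singleton_append] at h2
    exact h2

-- the lexicographic order on (c, n) pairs that Python's tuple comparison uses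
def plexLE (a b : Int × Int) : Prop := a.1 < b.1 ∨ (a.1 = b.1 ∧ a.2 ≤ b.2)
def plexGE (a b : Int × Int) : Prop := plexLE b a

theorem plexLE_refl (a : Int × Int) : plexLE a a := Or.inr ⟨rfl, le_refl _⟩
theorem plexLE_trans (a b c : Int × Int) (h1 : plexLE a b) (h2 : plexLE b c) : plexLE a c := by
  rcases h1 with h1 | ⟨h1, h1'⟩ <;> rcases h2 with h2 | ⟨h2, h2'⟩ <;>
    [exact Or.inl (h1.trans h2); exact Or.inl (h2 ▸ h1); exact Or.inl (h1 ▸ h2);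
     exact Or.inr ⟨h1.trans h2, h1'.trans h2'⟩]
theorem plexLE_antisymm (a b : Int × Int) (h1 : plexLE a b) (h2 : plexLE b a) : a = b := by
  rcases h1 with h1 | ⟨h1, h1'⟩ <;> rcases h2 with h2 | ⟨h2, h2'⟩ <;>
    [omega; omega; omega; exact Prod.ext h1 (le_antisymm h1' h2')]

-- sorted with key toLex is pairwise plexLE
theorem sorted_pairwise_plexLE (xs : List (Int × Int)) :
    (PySem.List.sorted xs (fun p => (toLex p : Lex (Int × Int))) false).Pairwise plexLE := by
  have h := PySem.List.sorted_pairwise (xs := xs) (key := fun p => (toLex p : Lex (Int × Int)))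
  refine h.imp ?_
  intro a b hab
  unfold plexLE
  exact Prod.Lex.le_iff.mp hab

theorem move_horizontal_eq (rows_to_cells : List (Int × List (Int × Int))) (coords : List (Int × Int × Int)) (current_nid : Int) (direction : Int) :
    move_horizontal_py rows_to_cells coords current_nid direction
      = move_horizontal_py_alt rows_to_cells coords current_nid direction := by
  unfold move_horizontal_py move_horizontal_py_alt
  cases hc : (PySem.Dict.mk coords).get? current_nid with
  | none => rfl
  | some rc =>
    dsimp only
    cases hr : (PySem.Dict.mk rows_to_cells).get? rc.1 with
    | none => rfl
    | some cellsRaw =>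
      dsimp only
      have hperm : (PySem.List.sorted cellsRaw (fun p => (toLex p : Lex (Int × Int))) false).Perm cellsRaw :=
        PySem.List.sorted_perm _ _ _
      by_cases hd : direction > 0
      · rw [if_pos hd, if_pos hd]
        -- direction > 0: both sides compute the plexLE-least cell with c > cur_col
        have hA : IsBest (fun p => decide (rc.2 < p.1)) plexLE cellsRaw
            ((PySem.List.sorted cellsRaw (fun p => (toLex p : Lex (Int × Int))) false).find?
              (fun p => decide (rc.2 < p.1))) :=
          isBest_perm hperm
            (isBest_find?_of_pairwise plexLE_refl (sorted_pairwise_plexLE cellsRaw))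
        have hB : IsBest (fun p => decide (rc.2 < p.1)) plexLE cellsRaw
            (cellsRaw.foldl (fun best cell =>
              if decide (rc.2 < cell.1) &&
                 (match best with
                  | none => true
                  | some b => decide (cell.1 < b.1) || (decide (cell.1 = b.1) && decide (cell.2 < b.2)))
              then some cell else best) none) :=
          isBest_foldl (q := fun p => decide (rc.2 < p.1))
            (ltB := fun c b => decide (c.1 < b.1) || (decide (c.1 = b.1) && decide (c.2 < b.2)))
            (le := plexLE) plexLE_refl plexLE_trans
            (by intro a b h; simp only [Bool.or_eq_true, Bool.and_eq_true, decide_eq_true_eq] at h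
                rcases h with h | ⟨h1, h2⟩
                · exact Or.inl h
                · exact Or.inr ⟨h1, le_of_lt h2⟩)
            (by intro a b h; simp only [Bool.or_eq_false_iff, Bool.and_eq_false_iff,
                  decide_eq_false_iff_not, not_lt] at h
                unfold plexLE; omega)
            cellsRaw [] none (fun p hm => absurd hm List.not_mem_nil)
        rw [isBest_unique plexLE_antisymm hA hB]
      · rw [if_neg hd, if_neg hd]
        -- direction ≤ 0: both sides compute the plexLE-greatest cell with c < cur_col
        have hpw : (PySem.List.sorted cellsRaw (fun p => (toLex p : Lex (Int × Int))) false).reverse.Pairwise plexGE := by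
          rw [List.pairwise_reverse]
          exact (sorted_pairwise_plexLE cellsRaw).imp (fun h => h)
        have hA : IsBest (fun p => decide (p.1 < rc.2)) plexGE cellsRaw
            ((PySem.List.sorted cellsRaw (fun p => (toLex p : Lex (Int × Int))) false).reverse.find?
              (fun p => decide (p.1 < rc.2))) :=
          isBest_perm ((List.reverse_perm _).trans hperm)
            (isBest_find?_of_pairwise (le := plexGE) (fun a => plexLE_refl a) hpw)
        have hB : IsBest (fun p => decide (p.1 < rc.2)) plexGE cellsRaw
            (cellsRaw.foldl (fun best cell =>
              if decide (cell.1 < rc.2) &&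
                 (match best with
                  | none => true
                  | some b => decide (b.1 < cell.1) || (decide (b.1 = cell.1) && decide (b.2 < cell.2)))
              then some cell else best) none) :=
          isBest_foldl (q := fun p => decide (p.1 < rc.2))
            (ltB := fun c b => decide (b.1 < c.1) || (decide (b.1 = c.1) && decide (b.2 < c.2)))
            (le := plexGE)
            (fun a => plexLE_refl a)
            (fun a b c h1 h2 => plexLE_trans c b a h2 h1)
            (by intro a b h; simp only [Bool.or_eq_true, Bool.and_eq_true, decide_eq_true_eq] at h
                unfold plexGE plexLE
                rcases h with h | ⟨h1, h2⟩
                · exact Or.inl h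
                · exact Or.inr ⟨h1, le_of_lt h2⟩)
            (by intro a b h; simp only [Bool.or_eq_false_iff, Bool.and_eq_false_iff,
                  decide_eq_false_iff_not, not_lt] at h
                unfold plexGE plexLE; omega)
            cellsRaw [] none (fun p hm => absurd hm List.not_mem_nil)
        rw [isBest_unique (fun a b h1 h2 => plexLE_antisymm a b h2 h1) hA hB]

-- ===== VERDICT (by name: the statement is the Claim_ definition above) =====
theorem move_horizontal_py_spec : Claim_equal_move_horizontal_py := by
  intro rows_to_cells coords current_nid direction _ _
  exact move_horizontal_eq rows_to_cells coords current_nid direction
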